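-- pv_equiv track=rewrite | github.com/SnakeSnuggles/block-blast-ai | ai.py | calculate_hole_penalty
-- ===== SOURCE A (Python) =====
-- def calculate_hole_penalty(board):
--     penalty = 0
--     surroundings = [(0,1), (1,0), (0,-1), (-1,0)]
--
--     for (x, y), filled in board.items():
--         if not filled:  # If the space is empty
--             surrounding_filled = sum(
--                 (x + dx, y + dy) in board and board[x + dx, y + dy]
--                 for dx, dy in surroundings
--             )
--
--             if surrounding_filled == 3:
--                 penalty += 1
--             elif surrounding_filled == 4:
--                 penalty += 3  # Extra penalty for fully enclosed holes
--
--     return -penalty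
-- ===== SOURCE B (Python) =====
-- def calculate_hole_penalty(board):
--     surroundings = [(0, 1), (1, 0), (0, -1), (-1, 0)]
--     # scatter: every filled cell votes for each empty neighbour present on the board
--     targets = [(x + dx, y + dy)
--                for (x, y), filled in board.items() if filled
--                for dx, dy in surroundings
--                if (x + dx, y + dy) in board and not board[(x + dx, y + dy)]]
--     counts = {}
--     for n in targets:
--         counts[n] = counts.get(n, 0) + 1
--     total = 0
--     for c in counts.values():
--         if c == 3:
--             total += 1
--         elif c == 4:
--             total += 3
--     return -total
-- ===== Notes on version B (the rewrite author's own statement) =====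
-- stated objective: alternative
-- what changed: B scatters instead of gathering: one pass over the filled cells increments a plain-dict count for each empty on-board neighbour, then a pass over the count table sums the penalties; A instead probes the four neighbours of every empty cell.
import Mathlib
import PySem

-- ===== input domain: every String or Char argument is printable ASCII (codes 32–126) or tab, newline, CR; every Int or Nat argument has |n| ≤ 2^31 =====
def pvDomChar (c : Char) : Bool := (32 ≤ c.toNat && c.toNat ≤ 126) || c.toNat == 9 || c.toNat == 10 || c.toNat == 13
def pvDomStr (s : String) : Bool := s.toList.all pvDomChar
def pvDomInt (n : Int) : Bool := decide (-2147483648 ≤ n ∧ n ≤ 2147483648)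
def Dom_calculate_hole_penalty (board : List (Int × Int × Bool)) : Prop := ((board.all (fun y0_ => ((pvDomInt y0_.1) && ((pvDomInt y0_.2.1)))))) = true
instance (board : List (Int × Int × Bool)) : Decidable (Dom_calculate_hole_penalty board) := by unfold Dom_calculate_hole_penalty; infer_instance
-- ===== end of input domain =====

-- B counts filled→empty adjacencies by scattering from the filled cells into a dict instead of
-- gathering around each empty cell (alternative decomposition, same cost).


-- shared Python-dict lookup: 'k in board' / 'board[k]' (first match, the keys are unique)
def pvBoardGet? (board : List (Int × Int × Bool)) (k : Int × Int) : Option Bool :=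
  (board.find? (fun p => (p.1, p.2.1) == k)).map (fun p => p.2.2)

def pvDirs : List (Int × Int) := [(0, 1), (1, 0), (0, -1), (-1, 0)]

-- ===== PORT A =====
def calculate_hole_penalty (board : List (Int × Int × Bool)) : Int :=
  -(board.foldl (fun penalty p =>
      if !p.2.2 then
        let s : Int := pvDirs.foldl (fun a q =>
          a + (if pvBoardGet? board (p.1 + q.1, p.2.1 + q.2) = some true then 1 else 0)) 0
        if s = 3 then penalty + 1
        else if s = 4 then penalty + 3
        else penalty
      else penalty) 0)

-- ===== PORT B =====
def calculate_hole_penalty_alt (board : List (Int × Int × Bool)) : Int :=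
  let targets : List (Int × Int) := board.flatMap (fun p =>
    if p.2.2 then
      pvDirs.filterMap (fun q =>
        let n := (p.1 + q.1, p.2.1 + q.2)
        if pvBoardGet? board n = some false then some n else none)
    else [])
  let counts := targets.foldl (fun d n => d.insert n (d.getD n (0 : Int) + 1)) PySem.Dict.empty ;
  -(counts.values.foldl (fun t c =>
    if c = 3 then t + 1 else if c = 4 then t + 3 else t) (0 : Int))

-- ===== PRECONDITION & SPEC =====
-- board stands for a Python dict keyed by (x, y); an association list with duplicate keys does not
-- represent any dict input A can receive, so such lists are excluded.
def Pre_calculate_hole_penalty (board : List (Int × Int × Bool)) : Prop :=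
  (board.map (fun p => (p.1, p.2.1))).Nodup
instance (board : List (Int × Int × Bool)) : Decidable (Pre_calculate_hole_penalty board) := by
  unfold Pre_calculate_hole_penalty; infer_instance
def pvWitness_calculate_hole_penalty : (List (Int × Int × Bool)) :=
  [(0, 0, false), (0, 1, true), (1, 0, true), (0, -1, true), (-1, 0, true)]

def Spec_calculate_hole_penalty (board : List (Int × Int × Bool)) (out : Int) : Prop := out = calculate_hole_penalty_alt board
instance (board : List (Int × Int × Bool)) (out : Int) : Decidable (Spec_calculate_hole_penalty board out) := by unfold Spec_calculate_hole_penalty; infer_instance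

-- ===== CLAIM (what is proved, stated in full; the proofs are below) =====
def Claim_equal_calculate_hole_penalty : Prop := ∀ (board : List (Int × Int × Bool)), Dom_calculate_hole_penalty board → Pre_calculate_hole_penalty board → Spec_calculate_hole_penalty board (calculate_hole_penalty board)

-- ===== LEMMAS AND PROOFS =====

-- key of an entry
def pvPos (p : Int × Int × Bool) : Int × Int := (p.1, p.2.1)

-- penalty of one empty cell from its filled-neighbour count
def pvPen (c : Int) : Int := if c = 3 then 1 else if c = 4 then 3 else 0

-- A's inner sum: number of filled neighbours of cell c
def pvCnt (board : List (Int × Int × Bool)) (c : Int × Int) : Int :=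
  pvDirs.foldl (fun a q =>
    a + (if pvBoardGet? board (c.1 + q.1, c.2 + q.2) = some true then 1 else 0)) 0

-- B's scattered list of (filled cell, empty neighbour) votes
def pvTargets (board : List (Int × Int × Bool)) : List (Int × Int) :=
  board.flatMap (fun p =>
    if p.2.2 then
      pvDirs.filterMap (fun q =>
        let n := (p.1 + q.1, p.2.1 + q.2)
        if pvBoardGet? board n = some false then some n else none)
    else [])

theorem pvPen_step (s acc : Int) :
    (if s = 3 then acc + 1 else if s = 4 then acc + 3 else acc) = acc + pvPen s := by
  unfold pvPen; split_ifs <;> omega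

-- A as a sum over its empty entries
theorem pvA_loop (board l : List (Int × Int × Bool)) (acc : Int) :
    l.foldl (fun penalty p =>
      if !p.2.2 then
        let s : Int := pvDirs.foldl (fun a q =>
          a + (if pvBoardGet? board (p.1 + q.1, p.2.1 + q.2) = some true then 1 else 0)) 0
        if s = 3 then penalty + 1
        else if s = 4 then penalty + 3
        else penalty
      else penalty) acc
    = acc + (((l.filter (fun p => !p.2.2)).map (fun p => pvPen (pvCnt board (pvPos p)))).sum) := by
  induction l generalizing acc with
  | nil => simp
  | cons p t ih =>
    rw [List.foldl_cons, ih, List.filter_cons]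
    by_cases hp : p.2.2
    · have hb : (!p.2.2) = false := by rw [hp]; rfl
      rw [hb]
      simp
    · have hp' : p.2.2 = false := by simpa using hp
      have hb : (!p.2.2) = true := by rw [hp']; rfl
      rw [if_pos hb, if_pos hb, List.map_cons, List.sum_cons]
      rw [show (let s : Int := pvDirs.foldl (fun a q =>
            a + (if pvBoardGet? board (p.1 + q.1, p.2.1 + q.2) = some true then 1 else 0)) 0;
          if s = 3 then acc + 1 else if s = 4 then acc + 3 else acc)
          = acc + pvPen (pvCnt board (pvPos p)) from pvPen_step _ _]
      ring

theorem pvA_sum (board : List (Int × Int × Bool)) :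
    calculate_hole_penalty board
      = -(((board.filter (fun p => !p.2.2)).map (fun p => pvPen (pvCnt board (pvPos p)))).sum) := by
  unfold calculate_hole_penalty
  rw [pvA_loop board board 0]; simp

theorem pvB_values_loop (l : List Int) (acc : Int) :
    l.foldl (fun t c => if c = 3 then t + 1 else if c = 4 then t + 3 else t) acc
      = acc + (l.map pvPen).sum := by
  induction l generalizing acc with
  | nil => simp
  | cons c t ih =>
    rw [List.foldl_cons, ih, pvPen_step, List.map_cons, List.sum_cons]
    ring

-- B as a sum over the distinct scattered targets
theorem pvB_sum (board : List (Int × Int × Bool)) :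
    calculate_hole_penalty_alt board
      = -(((PySem.Set.ofList (pvTargets board)).map
            (fun c => pvPen ((pvTargets board).count c : Int))).sum) := by
  show -(((board.flatMap (fun p =>
      if p.2.2 then
        pvDirs.filterMap (fun q =>
          let n := (p.1 + q.1, p.2.1 + q.2)
          if pvBoardGet? board n = some false then some n else none)
      else [])).foldl (fun d n => d.insert n (d.getD n (0 : Int) + 1)) PySem.Dict.empty).values.foldl
        (fun t c => if c = 3 then t + 1 else if c = 4 then t + 3 else t) (0 : Int)) = _
  rw [show (board.flatMap (fun p =>
      if p.2.2 then
        pvDirs.filterMap (fun q =>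
          let n := (p.1 + q.1, p.2.1 + q.2)
          if pvBoardGet? board n = some false then some n else none)
      else [])) = pvTargets board from rfl]
  rw [PySem.Dict.foldl_insert_getD_add_one_eq_counter]
  rw [pvB_values_loop]
  have hv : (PySem.Dict.counter (pvTargets board)).values
      = (PySem.Set.ofList (pvTargets board)).map (fun k => ((pvTargets board).count k : Int)) := by
    show ((PySem.Dict.counter (pvTargets board)).items.map (·.2)) = _
    rw [PySem.Dict.items_counter]; simp
  rw [hv]; simp [List.map_map, Function.comp_def]

-- with unique keys, lookup of a member's key returns that member's value
theorem pvGet_mem (board : List (Int × Int × Bool)) (p : Int × Int × Bool)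
    (hnd : (board.map (fun p => (p.1, p.2.1))).Nodup) (hm : p ∈ board) :
    pvBoardGet? board (pvPos p) = some p.2.2 := by
  induction board with
  | nil => cases hm
  | cons h t ih =>
    simp only [List.map_cons, List.nodup_cons] at hnd
    rcases List.mem_cons.mp hm with rfl | hm'
    · simp [pvBoardGet?, pvPos, List.find?_cons]
    · have hne : (h.1, h.2.1) ≠ (p.1, p.2.1) := by
        intro he; exact hnd.1 (he ▸ List.mem_map_of_mem hm')
      have hbe2 : ((h.1, h.2.1) == pvPos p) = false := by
        simp only [beq_eq_false_iff_ne, pvPos]; exact hne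
      show pvBoardGet? (h :: t) (pvPos p) = some p.2.2
      simp only [pvBoardGet?, List.find?_cons, hbe2]
      exact ih hnd.2 hm'

-- number of entries with key k and value true, as an indicator of the lookup
theorem pvCountP_filled (board : List (Int × Int × Bool)) (k : Int × Int)
    (hnd : (board.map (fun p => (p.1, p.2.1))).Nodup) :
    (board.countP (fun p => p.2.2 && ((p.1, p.2.1) == k)))
      = if pvBoardGet? board k = some true then 1 else 0 := by
  induction board with
  | nil => simp [pvBoardGet?]
  | cons h t ih =>
    simp only [List.map_cons, List.nodup_cons] at hnd
    by_cases hk : (h.1, h.2.1) = k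
    · have ht0 : t.countP (fun p => p.2.2 && ((p.1, p.2.1) == k)) = 0 := by
        rw [List.countP_eq_zero]
        intro p hp hcond
        simp only [Bool.and_eq_true, beq_iff_eq] at hcond
        exact hnd.1 (by rw [hk, ← hcond.2]; exact List.mem_map_of_mem hp)
      by_cases hf : h.2.2 <;>
        simp [List.countP_cons, hk, hf, ht0, pvBoardGet?, List.find?_cons]
    · rw [List.countP_cons]
      have : pvBoardGet? (h :: t) k = pvBoardGet? t k := by
        simp [pvBoardGet?, List.find?_cons, beq_iff_eq, hk]
      simp [this, hk, ih hnd.2]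

-- count of c among the votes of a single entry
theorem pvEntry_count (board : List (Int × Int × Bool)) (p : Int × Int × Bool) (c : Int × Int) :
    ((if p.2.2 then
        pvDirs.filterMap (fun q =>
          let n := (p.1 + q.1, p.2.1 + q.2)
          if pvBoardGet? board n = some false then some n else none)
      else []).count c)
    = if pvBoardGet? board c = some false then
        (if p.2.2 then
          (if (p.1, p.2.1 + 1) = c then 1 else 0) + (if (p.1 + 1, p.2.1) = c then 1 else 0)
          + (if (p.1, p.2.1 - 1) = c then 1 else 0) + (if (p.1 - 1, p.2.1) = c then 1 else 0)
        else 0)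
      else 0 := by
  by_cases hf : p.2.2
  · simp only [hf, if_true, List.count, List.countP_filterMap]
    by_cases hc : pvBoardGet? board c = some false
    · simp only [hc, if_true, pvDirs, List.countP_cons, List.countP_nil]
      have key : ∀ a b : Int, (Option.map (fun x => x == c)
          (if pvBoardGet? board (a, b) = some false then some (a, b) else none)).getD false
          = decide ((a, b) = c) := by
        intro a b
        by_cases h : pvBoardGet? board (a, b) = some false
        · by_cases he : (a, b) = c <;> simp [h, he, hc]
        · simp only [h, if_false, Option.map_none, Option.getD_none]
          by_cases he : (a, b) = c
          · rw [he] at h; exact absurd hc h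
          · simp [he]
      simp only [key]
      simp only [← sub_eq_add_neg]
      by_cases h1 : (p.1, p.2.1 + 1) = c <;> by_cases h2 : (p.1 + 1, p.2.1) = c <;>
        by_cases h3 : (p.1, p.2.1 - 1) = c <;> by_cases h4 : (p.1 - 1, p.2.1) = c <;>
          simp [h1, h2, h3, h4]
    · rw [if_neg hc, List.countP_eq_zero]
      intro q hq
      by_cases h : pvBoardGet? board (p.1 + q.1, p.2.1 + q.2) = some false
      · simp only [h, if_true, Option.map_some, Option.getD_some, beq_iff_eq]
        intro he; rw [he] at h; exact absurd h hc
      · simp [h]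
  · simp [hf]

-- a sum of a pointwise sum of four indicator maps splits
theorem pvSum_map_add4 (l : List (Int × Int × Bool)) (f1 f2 f3 f4 : Int × Int × Bool → Nat) :
    (l.map (fun p => if p.2.2 then f1 p + f2 p + f3 p + f4 p else 0)).sum
      = (l.map (fun p => if p.2.2 then f1 p else 0)).sum
      + (l.map (fun p => if p.2.2 then f2 p else 0)).sum
      + (l.map (fun p => if p.2.2 then f3 p else 0)).sum
      + (l.map (fun p => if p.2.2 then f4 p else 0)).sum := by
  induction l with
  | nil => simp
  | cons h t ih =>
    simp only [List.map_cons, List.sum_cons, ih]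
    by_cases hf : h.2.2 <;> simp [hf] <;> ring

theorem pvSum_indicator (board : List (Int × Int × Bool)) (k : Int × Int) :
    (board.map (fun p => if p.2.2 then (if (p.1, p.2.1) = k then 1 else 0) else 0)).sum
      = board.countP (fun p => p.2.2 && ((p.1, p.2.1) == k)) := by
  induction board with
  | nil => simp
  | cons h t ih =>
    rw [List.map_cons, List.sum_cons, ih, List.countP_cons]
    by_cases hf : h.2.2 <;> by_cases hk : (h.1, h.2.1) = k <;>
      simp [hf, hk, Nat.add_comm]

-- the central exchange: for an empty on-board cell, B's vote count is A's neighbour count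
theorem pvCount_targets (board : List (Int × Int × Bool)) (c : Int × Int)
    (hnd : (board.map (fun p => (p.1, p.2.1))).Nodup)
    (hc : pvBoardGet? board c = some false) :
    (((pvTargets board).count c : Int)) = pvCnt board c := by
  unfold pvTargets
  rw [List.count_flatMap]
  have hrw : (board.map (List.count c ∘ fun p =>
      if p.2.2 then
        pvDirs.filterMap (fun q =>
          let n := (p.1 + q.1, p.2.1 + q.2)
          if pvBoardGet? board n = some false then some n else none)
      else [])).sum
    = (board.map (fun p => if p.2.2 then
        (if (p.1, p.2.1) = (c.1, c.2 - 1) then 1 else 0) + (if (p.1, p.2.1) = (c.1 - 1, c.2) then 1 else 0)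
        + (if (p.1, p.2.1) = (c.1, c.2 + 1) then 1 else 0) + (if (p.1, p.2.1) = (c.1 + 1, c.2) then 1 else 0)
      else 0)).sum := by
    apply congrArg
    apply List.map_congr_left
    intro p _
    rw [Function.comp_apply, pvEntry_count board p c, if_pos hc]
    have e1 : ((p.1, p.2.1 + 1) = c) = ((p.1, p.2.1) = (c.1, c.2 - 1)) := by
      simp only [eq_iff_iff, Prod.ext_iff]; omega
    have e2 : ((p.1 + 1, p.2.1) = c) = ((p.1, p.2.1) = (c.1 - 1, c.2)) := by
      simp only [eq_iff_iff, Prod.ext_iff]; omega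
    have e3 : ((p.1, p.2.1 - 1) = c) = ((p.1, p.2.1) = (c.1, c.2 + 1)) := by
      simp only [eq_iff_iff, Prod.ext_iff]; omega
    have e4 : ((p.1 - 1, p.2.1) = c) = ((p.1, p.2.1) = (c.1 + 1, c.2)) := by
      simp only [eq_iff_iff, Prod.ext_iff]; omega
    simp only [e1, e2, e3, e4]
  rw [hrw, pvSum_map_add4, pvSum_indicator, pvSum_indicator, pvSum_indicator, pvSum_indicator,
    pvCountP_filled board _ hnd, pvCountP_filled board _ hnd,
    pvCountP_filled board _ hnd, pvCountP_filled board _ hnd]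
  simp only [pvCnt, pvDirs, List.foldl_cons, List.foldl_nil]
  push_cast
  simp only [← sub_eq_add_neg]
  by_cases h1 : pvBoardGet? board (c.1, c.2 - 1) = some true <;>
    by_cases h2 : pvBoardGet? board (c.1 - 1, c.2) = some true <;>
      by_cases h3 : pvBoardGet? board (c.1, c.2 + 1) = some true <;>
        by_cases h4 : pvBoardGet? board (c.1 + 1, c.2) = some true <;>
          simp [h1, h2, h3, h4]

-- every scattered target is an empty on-board cell
theorem pvTargets_mem (board : List (Int × Int × Bool)) (c : Int × Int)
    (hc : c ∈ pvTargets board) : pvBoardGet? board c = some false := by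
  unfold pvTargets at hc
  rcases List.mem_flatMap.mp hc with ⟨p, _, hin⟩
  by_cases hf : p.2.2
  · rw [if_pos hf] at hin
    rcases List.mem_filterMap.mp hin with ⟨q, _, hq⟩
    simp only at hq
    by_cases h : pvBoardGet? board (p.1 + q.1, p.2.1 + q.2) = some false
    · rw [if_pos h] at hq
      cases hq; exact h
    · rw [if_neg h] at hq; cases hq
  · rw [if_neg hf] at hin; cases hin

-- an empty lookup result exhibits an empty entry with that key
theorem pvGet_empty_mem (board : List (Int × Int × Bool)) (c : Int × Int)
    (hc : pvBoardGet? board c = some false) :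
    c ∈ (board.filter (fun p => !p.2.2)).map pvPos := by
  unfold pvBoardGet? at hc
  rcases Option.map_eq_some_iff.mp hc with ⟨p, hfind, hval⟩
  have hmem : p ∈ board := List.mem_of_find?_eq_some hfind
  have hkey' : (p.1, p.2.1) = c := by
    have := List.find?_some hfind
    simpa using this
  have hpf : p.2.2 = false := hval
  refine List.mem_map.mpr ⟨p, List.mem_filter.mpr ⟨hmem, by simp [hpf]⟩, ?_⟩
  simpa [pvPos] using hkey'

-- ===== VERDICT (by name: the statement is the Claim_ definition above) =====
theorem calculate_hole_penalty_spec : Claim_equal_calculate_hole_penalty := by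
  intro board _ hPre
  unfold Spec_calculate_hole_penalty
  rw [pvA_sum, pvB_sum]
  apply congrArg
  -- both sides as Finset sums of the same function
  have hEnd : (((board.filter (fun p => !p.2.2)).map pvPos)).Nodup := by
    have hsub : ((board.filter (fun p => !p.2.2)).map pvPos).Sublist (board.map pvPos) :=
      List.filter_sublist.map pvPos
    exact hsub.nodup (by simpa [pvPos] using hPre)
  have hSnd : (PySem.Set.ofList (pvTargets board)).Nodup := PySem.Set.nodup_ofList _
  have hA : ((board.filter (fun p => !p.2.2)).map (fun p => pvPen (pvCnt board (pvPos p)))).sum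
      = ∑ c ∈ ((board.filter (fun p => !p.2.2)).map pvPos).toFinset, pvPen (pvCnt board c) := by
    rw [List.sum_toFinset _ hEnd, List.map_map]
    rfl
  have hB : ((PySem.Set.ofList (pvTargets board)).map
        (fun c => pvPen ((pvTargets board).count c : Int))).sum
      = ∑ c ∈ (PySem.Set.ofList (pvTargets board)).toFinset, pvPen (pvCnt board c) := by
    rw [List.sum_toFinset _ hSnd]
    apply congrArg
    apply List.map_congr_left
    intro c hcS
    have hcT : c ∈ pvTargets board := (PySem.Set.mem_ofList _ _).mp hcS
    rw [pvCount_targets board c (by simpa [pvPos] using hPre) (pvTargets_mem board c hcT)]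
  rw [hA, hB]
  refine (Finset.sum_subset ?_ ?_).symm
  · intro c hcS
    have hcT : c ∈ pvTargets board := (PySem.Set.mem_ofList _ _).mp (List.mem_toFinset.mp hcS)
    exact List.mem_toFinset.mpr (pvGet_empty_mem board c (pvTargets_mem board c hcT))
  · intro c hcE hcS
    have hcE' := List.mem_toFinset.mp hcE
    rcases List.mem_map.mp hcE' with ⟨p, hpf, hpc⟩
    have hpm : p ∈ board := (List.mem_filter.mp hpf).1
    have hpe : p.2.2 = false := by
      have := (List.mem_filter.mp hpf).2; simpa using this
    have hlk : pvBoardGet? board c = some false := by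
      have := pvGet_mem board p (by simpa [pvPos] using hPre) hpm
      rw [hpc] at this; rw [this, hpe]
    have hnT : c ∉ pvTargets board := by
      intro hT
      exact hcS (List.mem_toFinset.mpr ((PySem.Set.mem_ofList _ _).mpr hT))
    have hz : pvCnt board c = 0 := by
      rw [← pvCount_targets board c (by simpa [pvPos] using hPre) hlk,
        List.count_eq_zero.mpr hnT]
      rfl
    rw [hz]; rfl
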